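-- pv_equiv track=rewrite | github.com/MrBrantCode/unitest_baseline | mut_generate/mist_train_cf/cf_7044/solution.py | sort_positive_descending
-- ===== SOURCE A (Python) =====
-- def sort_positive_descending(arr):
--     count_dict = {}
--     for num in arr:
--         if num > 0:
--             count_dict[num] = count_dict.get(num, 0) + 1
--
--     unique_list = []
--     for key, value in count_dict.items():
--         unique_list.extend([key] * value)
--
--     unique_list.sort(reverse=True)
--     return unique_list
-- ===== SOURCE B (Python) =====
-- def sort_positive_descending(arr):
--     result = []
--     for num in arr:
--         if num > 0:
--             i = 0
--             while i < len(result) and result[i] >= num: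
--                 i += 1
--             result.insert(i, num)
--     return result
-- ===== Notes on version B (the rewrite author's own statement) =====
-- stated objective: alternative
-- what changed: B replaces A's count-dict, replicate-reconstruction and builtin sort with a single pass that insertion-sorts each positive element directly into a descending accumulator (no dict, no library sort).
import Mathlib
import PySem

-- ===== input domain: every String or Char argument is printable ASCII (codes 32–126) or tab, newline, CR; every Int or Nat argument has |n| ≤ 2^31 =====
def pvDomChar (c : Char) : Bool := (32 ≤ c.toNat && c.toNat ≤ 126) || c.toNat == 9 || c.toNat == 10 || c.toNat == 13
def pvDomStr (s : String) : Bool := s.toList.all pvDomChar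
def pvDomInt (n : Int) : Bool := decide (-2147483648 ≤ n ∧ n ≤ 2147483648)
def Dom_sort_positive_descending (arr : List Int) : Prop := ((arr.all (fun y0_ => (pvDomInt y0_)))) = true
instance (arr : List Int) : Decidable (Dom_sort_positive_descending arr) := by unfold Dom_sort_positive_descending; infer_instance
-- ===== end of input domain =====

-- ===== PORT A =====
-- B replaces A's count-dict + rebuild + builtin sort with a one-pass insertion sort into a descending accumulator (alternative algorithm).
def sort_positive_descending (arr : List Int) : List Int :=
  let count_dict := arr.foldl
    (fun d num => if num > 0 then d.insert num (d.getD num 0 + 1) else d)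
    (PySem.Dict.empty : PySem.Dict Int Int)
  let unique_list := count_dict.items.foldl
    (fun acc kv => acc ++ List.replicate kv.2.toNat kv.1) []
  PySem.List.sorted unique_list (fun x => x) true

-- ===== PORT B =====
-- B's 'while i < len(result) and result[i] >= num: …; result.insert(i, num)' as structural recursion.
def pvInsertDesc (num : Int) : List Int → List Int
  | [] => [num]
  | x :: xs => if x ≥ num then x :: pvInsertDesc num xs else num :: x :: xs

def sort_positive_descending_alt (arr : List Int) : List Int :=
  arr.foldl (fun result num => if num > 0 then pvInsertDesc num result else result) []

-- ===== PRECONDITION & SPEC =====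
def Spec_sort_positive_descending (arr : List Int) (out : List Int) : Prop := out = sort_positive_descending_alt arr
instance (arr : List Int) (out : List Int) : Decidable (Spec_sort_positive_descending arr out) := by unfold Spec_sort_positive_descending; infer_instance

-- ===== CLAIM (what is proved, stated in full; the proofs are below) =====
def Claim_equal_sort_positive_descending : Prop := ∀ (arr : List Int), Dom_sort_positive_descending arr → Spec_sort_positive_descending arr (sort_positive_descending arr)

-- ===== LEMMAS AND PROOFS =====

-- On a Nodup list of keys, summing "c at each occurrence of a" collapses to c or 0.
theorem pv_sum_if_nodup (a : Int) (c : Nat) (ks : List Int) (hnd : ks.Nodup) :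
    (ks.map (fun k => if k = a then c else 0)).sum = if a ∈ ks then c else 0 := by
  induction ks with
  | nil => simp
  | cons x xs ih =>
    rcases List.nodup_cons.mp hnd with ⟨hx, hxs⟩
    by_cases hax : x = a
    · subst hax
      have hzero : (xs.map (fun k => if k = x then c else 0)).sum = 0 := by
        apply List.sum_eq_zero
        intro y hy
        rcases List.mem_map.mp hy with ⟨k, hk, rfl⟩
        have hne : ¬ k = x := fun h => hx (h ▸ hk)
        simp [hne]
      simp [hzero]
    · have hax' : ¬ a = x := fun h => hax h.symm
      simp [hax, hax', ih hxs]

-- A's expanded unique_list is a permutation of the positives-only list.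
theorem pv_expand_perm (xs : List Int) :
    ((PySem.Set.ofList xs).flatMap (fun k => List.replicate ((xs.count k : Int)).toNat k)).Perm xs := by
  rw [List.perm_iff_count]
  intro a
  have hflat : ∀ (l : List Int) (f : Int → List Int),
      (l.flatMap f).count a = (l.map fun x => (f x).count a).sum := by
    intro l f
    induction l with
    | nil => simp
    | cons x t ih => simp [List.flatMap_cons, List.count_append, ih]
  rw [hflat]
  have hmap : ((PySem.Set.ofList xs).map
      (fun k => (List.replicate ((xs.count k : Int)).toNat k).count a)).sum
      = ((PySem.Set.ofList xs).map
      (fun k => if k = a then xs.count a else 0)).sum := by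
    apply congrArg
    apply List.map_congr_left
    intro k _
    rw [List.count_replicate]
    by_cases h : k = a
    · subst h; simp
    · simp [h]
  rw [hmap, pv_sum_if_nodup a (xs.count a) _ (PySem.Set.nodup_ofList xs)]
  by_cases hmem : a ∈ xs
  · simp [(PySem.Set.mem_ofList xs a).mpr hmem]
  · have hnot : a ∉ PySem.Set.ofList xs := fun h => hmem ((PySem.Set.mem_ofList xs a).mp h)
    simp [hnot, List.count_eq_zero_of_not_mem hmem]

-- Inserting preserves the multiset of elements.
theorem pv_insertDesc_perm (n : Int) (l : List Int) : (pvInsertDesc n l).Perm (n :: l) := by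
  induction l with
  | nil => simp [pvInsertDesc]
  | cons x xs ih =>
    by_cases h : x ≥ n
    · simpa [pvInsertDesc, h] using ((ih.cons x).trans (List.Perm.swap n x xs))
    · simp [pvInsertDesc, h]

-- Inserting preserves descending pairwise order.
theorem pv_insertDesc_pairwise (n : Int) (l : List Int)
    (h : l.Pairwise (fun a b => b ≤ a)) :
    (pvInsertDesc n l).Pairwise (fun a b => b ≤ a) := by
  induction l with
  | nil => simp [pvInsertDesc]
  | cons x xs ih =>
    rcases List.pairwise_cons.mp h with ⟨hx, hxs⟩
    by_cases hge : x ≥ n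
    · rw [pvInsertDesc, if_pos hge]
      refine List.pairwise_cons.mpr ⟨?_, ih hxs⟩
      intro y hy
      have hmem : y ∈ n :: xs := (pv_insertDesc_perm n xs).mem_iff.mp hy
      rcases List.mem_cons.mp hmem with rfl | h2
      · exact hge
      · exact hx y h2
    · rw [pvInsertDesc, if_neg hge]
      have hlt : x < n := lt_of_not_ge hge
      refine List.pairwise_cons.mpr ⟨?_, h⟩
      intro y hy
      rcases List.mem_cons.mp hy with rfl | h2
      · exact le_of_lt hlt
      · exact le_trans (hx y h2) (le_of_lt hlt)

-- The fold of B is a descending-pairwise permutation of acc ++ positives.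
theorem pv_fold_inv (arr : List Int) (acc : List Int)
    (hp : acc.Pairwise (fun a b => b ≤ a)) :
    (arr.foldl (fun result num => if num > 0 then pvInsertDesc num result else result) acc).Pairwise
      (fun a b => b ≤ a) ∧
    (arr.foldl (fun result num => if num > 0 then pvInsertDesc num result else result) acc).Perm
      (acc ++ arr.filter (fun n => decide (n > 0))) := by
  induction arr generalizing acc with
  | nil => simpa using hp
  | cons a t ih =>
    by_cases ha : a > 0
    · have step := ih (pvInsertDesc a acc) (pv_insertDesc_pairwise a acc hp)
      refine ⟨by simpa [ha] using step.1, ?_⟩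
      have h1 : (pvInsertDesc a acc ++ t.filter (fun n => decide (n > 0))).Perm
          (a :: (acc ++ t.filter (fun n => decide (n > 0)))) :=
        (pv_insertDesc_perm a acc).append_right _
      have h2 : (a :: (acc ++ t.filter (fun n => decide (n > 0)))).Perm
          (acc ++ a :: t.filter (fun n => decide (n > 0))) := List.perm_middle.symm
      have := step.2.trans (h1.trans h2)
      simpa [List.foldl_cons, ha, List.filter_cons] using this
    · have step := ih acc hp
      refine ⟨by simpa [ha] using step.1, ?_⟩
      simpa [List.foldl_cons, ha, List.filter_cons] using step.2

-- Two permuted Int lists have the same descending sort.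
theorem pv_sorted_rev_eq_of_perm (xs ys : List Int) (h : xs.Perm ys) :
    PySem.List.sorted xs (fun x => x) true = PySem.List.sorted ys (fun x => x) true := by
  apply List.Perm.eq_of_pairwise (le := fun a b : Int => b ≤ a)
  · intro a b _ _ h1 h2; exact le_antisymm h2 h1
  · exact PySem.List.sorted_pairwise_rev xs _
  · exact PySem.List.sorted_pairwise_rev ys _
  · exact (PySem.List.sorted_perm _ _ _).trans (h.trans (PySem.List.sorted_perm _ _ _).symm)

-- ===== VERDICT (by name: the statement is the Claim_ definition above) =====
theorem sort_positive_descending_spec : Claim_equal_sort_positive_descending := by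
  intro arr _
  show sort_positive_descending arr = sort_positive_descending_alt arr
  -- A's value is the descending sort of the positives.
  have hdict : arr.foldl
      (fun d num => if num > 0 then d.insert num (d.getD num 0 + 1) else d)
      (PySem.Dict.empty : PySem.Dict Int Int)
      = PySem.Dict.counter (arr.filter (fun n => n > 0)) := by
    rw [← PySem.Dict.foldl_insert_getD_add_one_eq_counter, List.foldl_filter]
    simp only [decide_eq_true_eq]
  have hA : sort_positive_descending arr
      = PySem.List.sorted (arr.filter (fun n => decide (n > 0))) (fun x => x) true := by
    simp only [sort_positive_descending, hdict,
      PySem.Dict.items_counter, List.foldl_map,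
      PySem.List.foldl_append_eq_flatMap
        (fun k => List.replicate (((arr.filter (fun n => n > 0)).count k : Int)).toNat k),
      List.nil_append]
    exact pv_sorted_rev_eq_of_perm _ _ (pv_expand_perm (arr.filter (fun n => n > 0)))
  -- B's value is descending-pairwise and a permutation of the positives.
  obtain ⟨hpw, hperm⟩ := pv_fold_inv arr [] (by simp)
  rw [hA]
  apply List.Perm.eq_of_pairwise (le := fun a b : Int => b ≤ a)
  · intro a b _ _ h1 h2; exact le_antisymm h2 h1
  · exact PySem.List.sorted_pairwise_rev _ _
  · exact hpw
  · exact (PySem.List.sorted_perm _ _ _).trans (hperm.trans (by simp)).symm
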